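-- pv_equiv track=rewrite | github.com/sbirnb/AdventOfCode2023 | src/adventofcode2023/day14.py | part1
-- ===== SOURCE A (Python) =====
-- from functools import reduce
-- from typing import Tuple, Iterable, Sequence
--
-- def part1(input_: Iterable[str]) -> int:
--     def update_state(state: Tuple[int, int], row: int, stone: str) -> Tuple[int, int]:
--         weight, n_stones = state
--         if stone == '.':
--             return weight + n_stones, n_stones
--         if stone == 'O':
--             return weight + row, n_stones + 1
--         if stone == '#':
--             return weight, 0
--     state = tuple(row.strip() for row in input_)
--     return sum(weight for weight, _ in reduce(
--         lambda states, updates: tuple(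
--             update_state(state, updates[0], stone) for state, stone in zip(states, updates[1]))
--         , enumerate(reversed(state), 1),
--         ((0, 0),) * len(state[-1])
--     ))
-- ===== SOURCE B (Python) =====
-- def part1(input_):
--     rows = [row.strip() for row in input_]
--     width = min(len(row) for row in rows)  # only columns present in every row survive A's zip truncation
--     height = len(rows)
--     total = 0
--     for c in range(width):
--         next_free = 0
--         for r, row in enumerate(rows):
--             ch = row[c]
--             if ch == 'O':
--                 total += height - next_free
--                 next_free += 1
--             elif ch == '#':
--                 next_free = r + 1
--     return total
-- ===== Notes on version B (the rewrite author's own statement) =====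
-- stated objective: simpler
-- what changed: Replaced the bottom-up reduce over zip-truncated tuples of per-column (weight, pending-stones) states with a plain top-down per-column sweep that keeps only next_free and adds the closed-form load height - next_free per stone.
import Mathlib
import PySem

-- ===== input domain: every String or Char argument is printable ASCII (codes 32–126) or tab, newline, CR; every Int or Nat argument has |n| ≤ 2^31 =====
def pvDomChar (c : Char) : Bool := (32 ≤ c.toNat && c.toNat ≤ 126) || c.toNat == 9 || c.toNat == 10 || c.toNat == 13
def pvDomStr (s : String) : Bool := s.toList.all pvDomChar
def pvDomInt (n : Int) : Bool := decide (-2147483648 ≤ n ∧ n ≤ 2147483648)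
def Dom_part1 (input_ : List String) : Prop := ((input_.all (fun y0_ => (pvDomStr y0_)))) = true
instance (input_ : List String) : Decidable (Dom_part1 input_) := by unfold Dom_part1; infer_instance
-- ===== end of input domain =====

-- B replaces A's bottom-up reduce over zip-truncated tuples of per-column (weight, pending) states
-- by a plain top-down per-column next_free sweep (simpler decomposition; return values only, no mutation).

-- ===== PORT A =====
-- update_state; the final 'else' branch is where Python returns None (and raises TypeError at the
-- next tuple unpacking); Pre_part1 excludes exactly the inputs on which such a None is ever unpacked.
def updateState (state : Int × Int) (row : Int) (stone : Char) : Int × Int :=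
  if stone = '.' then (state.1 + state.2, state.2)
  else if stone = 'O' then (state.1 + row, state.2 + 1)
  else if stone = '#' then (state.1, 0)
  else (0, 0)

def part1 (input_ : List String) : Int :=
  let state := input_.map (fun row => PySem.Str.strip row)
  -- state[-1]: IndexError on empty input, excluded by Pre_part1 (the getD "" default is dead code)
  let lastRow := (PySem.List.pyGet? state (-1)).getD ""
  let init : List (Int × Int) := List.replicate lastRow.toList.length ((0 : Int), (0 : Int))
  let final := (PySem.List.enumerate state.reverse 1).foldl
    (fun states p => (states.zip p.2.toList).map (fun q => updateState q.1 p.1 q.2)) init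
  (final.map (fun s => s.1)).sum

-- ===== PORT B =====
def part1_alt (input_ : List String) : Int :=
  let rows := input_.map (fun row => PySem.Str.strip row)
  -- min(len(row) for row in rows): ValueError on empty input, excluded by Pre_part1
  let width := (PySem.List.min? (rows.map (fun r => r.toList.length)) (fun x => x)).getD 0
  let height : Int := rows.length
  (List.range width).foldl (fun total c =>
    ((PySem.List.enumerate rows 0).foldl
      (fun (st : Int × Int) p =>
        -- ch = row[c]: always in range since c < width ≤ len(row); getD's default is dead code
        if p.2.toList.getD c ' ' = 'O' then (st.1 + 1, st.2 + (height - st.1))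
        else if p.2.toList.getD c ' ' = '#' then (p.1 + 1, st.2)
        else st)
      ((0 : Int), total)).2) 0

-- ===== PRECONDITION & SPEC =====
-- Pre_part1 holds exactly when the Python A returns normally: the input is nonempty (else
-- state[-1] raises IndexError) and every character other than '.', 'O', '#' in a stripped row
-- lies in a column that zip-truncation has already dropped or drops at the very next row going up
-- (otherwise update_state returns None and the next tuple unpacking raises TypeError).
def Pre_part1 (input_ : List String) : Prop :=
  input_ ≠ [] ∧
  (∀ r ∈ List.range (input_.map (fun s => (PySem.Str.strip s).toList)).length,
    ∀ c ∈ List.range (((input_.map (fun s => (PySem.Str.strip s).toList)).getD r []).length),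
     (((input_.map (fun s => (PySem.Str.strip s).toList)).getD r []).getD c ' '
        ∉ (['.', 'O', '#'] : List Char)) →
     ((∃ j ∈ List.range (input_.map (fun s => (PySem.Str.strip s).toList)).length,
         r ≤ j ∧ ((input_.map (fun s => (PySem.Str.strip s).toList)).getD j []).length ≤ c)
      ∨ (0 < r ∧ ((input_.map (fun s => (PySem.Str.strip s).toList)).getD (r - 1) []).length ≤ c)))
instance (input_ : List String) : Decidable (Pre_part1 input_) := by unfold Pre_part1; infer_instance

def pvWitness_part1 : List String := ["O#", ".O"]

def Spec_part1 (input_ : List String) (out : Int) : Prop := out = part1_alt input_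
instance (input_ : List String) (out : Int) : Decidable (Spec_part1 input_ out) := by unfold Spec_part1; infer_instance

-- ===== CLAIM (what is proved, stated in full; the proofs are below) =====
def Claim_equal_part1 : Prop := ∀ (input_ : List String), Dom_part1 input_ → Pre_part1 input_ → Spec_part1 input_ (part1 input_)

-- ===== LEMMAS AND PROOFS =====

-- A's per-column state fold, bottom-up with indices counted from `i`.
def colStep : List (List Char) → Int → (Int × Int) → Nat → (Int × Int)
  | [], _, s, _ => s
  | row :: rest, i, s, c => colStep rest (i + 1) (updateState s i (row.getD c ' ')) c

-- A's per-column value on a top-down column (index of the bottom char = 1).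
def colA : List Char → Int × Int
  | [] => (0, 0)
  | ch :: rest => updateState (colA rest) ((rest.length : Int) + 1) ch

-- number of 'O's above the first '#' (top-down)
def firstK : List Char → Int
  | [] => 0
  | ch :: rest => if ch = '#' then 0 else if ch = 'O' then firstK rest + 1 else firstK rest

-- B's per-column load, `d` = current row index minus next_free
def bload : List Char → Int → Int
  | [], _ => 0
  | ch :: rest, d =>
    if ch = 'O' then ((rest.length : Int) + 1 + d) + bload rest d
    else if ch = '#' then bload rest 0
    else bload rest (d + 1)

def colOf (rows : List (List Char)) (c : Nat) : List Char := rows.map (fun r => r.getD c ' ')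

lemma enumerate_map {α β : Type} (g : α → β) (l : List α) (i : Int) :
    PySem.List.enumerate (l.map g) i = (PySem.List.enumerate l i).map (fun p => (p.1, g p.2)) := by
  induction l generalizing i with
  | nil => simp [PySem.List.enumerate]
  | cons x xs ih => simp [PySem.List.enumerate_cons, ih]

lemma bload_shift (col : List Char) : ∀ d : Int, bload col (d + 1) = bload col d + firstK col := by
  induction col with
  | nil => intro d; simp [bload, firstK]
  | cons ch rest ih =>
    intro d
    by_cases hH : ch = '#'
    · simp [bload, firstK, hH]
    · by_cases hO : ch = 'O'
      · simp only [bload, firstK, if_pos hO, if_neg hH]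
        rw [ih d]; ring
      · simp only [bload, firstK, if_neg hO, if_neg hH]
        rw [ih (d + 1), ih d]

lemma colA_eq (col : List Char)
    (hgood : ∀ ch ∈ col, ch = '.' ∨ ch = 'O' ∨ ch = '#') :
    colA col = (bload col 0, firstK col) := by
  induction col with
  | nil => simp [colA, bload, firstK]
  | cons ch rest ih =>
    have ihr := ih (fun x hx => hgood x (List.mem_cons_of_mem _ hx))
    rcases hgood ch (List.mem_cons_self) with h | h | h <;> subst h
    · have h1 : ('.' : Char) ≠ 'O' := by decide
      have h2 : ('.' : Char) ≠ '#' := by decide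
      have hs : bload rest 1 = bload rest 0 + firstK rest := by
        simpa using bload_shift rest 0
      simp [colA, updateState, ihr, bload, firstK, h1, h2, hs]
    · have h1 : ('O' : Char) ≠ '.' := by decide
      have h2 : ('O' : Char) ≠ '#' := by decide
      simp [colA, updateState, ihr, bload, firstK, h1, h2]
      ring
    · have h1 : ('#' : Char) ≠ '.' := by decide
      have h2 : ('#' : Char) ≠ 'O' := by decide
      simp [colA, updateState, ihr, bload, firstK, h1, h2]

-- the zip/map step keeps exactly min-length many columns
def wmin (rows : List (List Char)) (w : Nat) : Nat := rows.foldl (fun m row => Nat.min m row.length) w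

lemma wmin_le (rows : List (List Char)) (w : Nat) : wmin rows w ≤ w := by
  induction rows generalizing w with
  | nil => simp [wmin]
  | cons row rest ih =>
    calc wmin (row :: rest) w = wmin rest (Nat.min w row.length) := rfl
    _ ≤ Nat.min w row.length := ih _
    _ ≤ w := Nat.min_le_left _ _

lemma wmin_le_mem (rows : List (List Char)) (row : List Char) (h : row ∈ rows) :
    ∀ w : Nat, wmin rows w ≤ row.length := by
  induction rows with
  | nil => cases h
  | cons x rest ih =>
    intro w
    rcases List.mem_cons.mp h with h1 | h'
    · subst h1
      calc wmin (row :: rest) w = wmin rest (Nat.min w row.length) := rfl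
      _ ≤ Nat.min w row.length := wmin_le _ _
      _ ≤ row.length := Nat.min_le_right _ _
    · exact ih h' _

-- A's fold over the rows (bottom-up list), characterised: length and entries
lemma stepA_len (rows : List (List Char)) : ∀ (i : Int) (init : List (Int × Int)),
    ((PySem.List.enumerate rows i).foldl
      (fun states p => (states.zip p.2).map (fun q => updateState q.1 p.1 q.2)) init).length
    = wmin rows init.length := by
  induction rows with
  | nil => intro i init; simp [PySem.List.enumerate, wmin]
  | cons row rest ih =>
    intro i init
    rw [PySem.List.enumerate_cons, List.foldl_cons, ih]
    simp [wmin, Nat.min_comm]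

lemma stepA_get (rows : List (List Char)) : ∀ (i : Int) (init : List (Int × Int)) (c : Nat),
    c < wmin rows init.length →
    ((PySem.List.enumerate rows i).foldl
      (fun states p => (states.zip p.2).map (fun q => updateState q.1 p.1 q.2)) init)[c]?
    = some (colStep rows i (init.getD c (0, 0)) c) := by
  induction rows with
  | nil =>
    intro i init c hc
    simp only [wmin, List.foldl_nil] at hc
    rw [PySem.List.enumerate_nil, List.foldl_nil]
    show init[c]? = some (init.getD c (0, 0))
    rw [List.getD_eq_getElem?_getD, List.getElem?_eq_getElem hc, Option.getD_some]
  | cons row rest ih =>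
    intro i init c hc
    have hc' : c < wmin rest ((init.zip row).map (fun q => updateState q.1 i q.2)).length := by
      simpa [wmin, Nat.min_comm] using hc
    have hci : c < init.length := lt_of_lt_of_le hc (wmin_le _ _)
    have hcr : c < row.length :=
      lt_of_lt_of_le hc (wmin_le_mem _ _ (List.mem_cons_self) _)
    rw [PySem.List.enumerate_cons, List.foldl_cons, ih _ _ c hc']
    congr 1
    simp only [colStep]
    congr 1
    have hcz : c < ((init.zip row).map (fun q => updateState q.1 i q.2)).length := by
      simp [hci, hcr]
    rw [List.getD_eq_getElem?_getD, List.getElem?_eq_getElem hcz]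
    rw [List.getD_eq_getElem?_getD, List.getElem?_eq_getElem hci]
    rw [List.getD_eq_getElem?_getD, List.getElem?_eq_getElem hcr]
    simp [List.getElem_zip]

lemma colStep_append (xs ys : List (List Char)) : ∀ (i : Int) (s : Int × Int) (c : Nat),
    colStep (xs ++ ys) i s c = colStep ys (i + xs.length) (colStep xs i s c) c := by
  induction xs with
  | nil => intro i s c; simp [colStep]
  | cons x rest ih =>
    intro i s c
    simp only [List.cons_append, colStep, ih]
    congr 1
    simp only [List.length_cons]
    push_cast
    ring

lemma colStep_reverse (rows : List (List Char)) (c : Nat) :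
    colStep rows.reverse 1 (0, 0) c = colA (colOf rows c) := by
  induction rows with
  | nil => simp [colStep, colA, colOf]
  | cons row rest ih =>
    rw [List.reverse_cons, colStep_append, ih]
    simp only [colStep, colOf, List.map_cons, colA]
    rw [← colOf]
    congr 1
    simp [colOf]
    ring

-- B's inner loop computes bload of the column (pure algebra; no range side conditions needed)
lemma innerB (height : Int) (c : Nat) (rows : List (List Char)) :
    ∀ (r nf t : Int), height = r + rows.length →
    ((PySem.List.enumerate rows r).foldl
      (fun (st : Int × Int) p =>
        if p.2.getD c ' ' = 'O' then (st.1 + 1, st.2 + (height - st.1))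
        else if p.2.getD c ' ' = '#' then (p.1 + 1, st.2)
        else st)
      (nf, t)).2
    = t + bload (colOf rows c) (r - nf) := by
  induction rows with
  | nil => intro r nf t h; simp [PySem.List.enumerate, colOf, bload]
  | cons row rest ih =>
    intro r nf t h
    have hh : height = (r + 1) + (rest.length : Int) := by
      simp only [List.length_cons] at h; push_cast at h ⊢; omega
    have hcol : colOf (row :: rest) c = row.getD c ' ' :: colOf rest c := by simp [colOf]
    have hlen : ((colOf rest c).length : Int) = (rest.length : Int) := by simp [colOf]
    rw [PySem.List.enumerate_cons, List.foldl_cons]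
    by_cases hO : row.getD c ' ' = 'O'
    · rw [if_pos hO, ih (r + 1) (nf + 1) _ hh, hcol]
      simp only [bload, if_pos hO, hlen]
      have e1 : r + 1 - (nf + 1) = r - nf := by ring
      rw [e1, hh]
      ring
    · rw [if_neg hO]
      by_cases hH : row.getD c ' ' = '#'
      · rw [if_pos hH, ih (r + 1) (r + 1) _ hh, hcol]
        simp only [bload, if_neg hO, if_pos hH]
        have e1 : r + 1 - (r + 1) = (0 : Int) := by ring
        rw [e1]
      · rw [if_neg hH, ih (r + 1) nf _ hh, hcol]
        simp only [bload, if_neg hO, if_neg hH]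
        have e1 : r + 1 - nf = (r - nf) + 1 := by ring
        rw [e1]

-- min-fold facts
lemma foldl_min_le_init (l : List Nat) (a : Nat) : List.foldl min a l ≤ a := by
  induction l generalizing a with
  | nil => simp
  | cons x t ih => exact le_trans (ih (min a x)) (Nat.min_le_left _ _)

lemma foldl_min_le_mem (l : List Nat) (c : Nat) (h : c ∈ l) :
    ∀ a : Nat, List.foldl min a l ≤ c := by
  induction l with
  | nil => cases h
  | cons x t ih =>
    intro a
    rcases List.mem_cons.mp h with h1 | h'
    · subst h1
      calc List.foldl min a (c :: t) = List.foldl min (min a c) t := rfl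
      _ ≤ min a c := foldl_min_le_init _ _
      _ ≤ c := Nat.min_le_right _ _
    · exact ih h' _

lemma foldl_min_reverse (l : List Nat) (a : Nat) :
    List.foldl min a l.reverse = List.foldl min a l := by
  induction l generalizing a with
  | nil => rfl
  | cons x t ih =>
    simp only [List.reverse_cons, List.foldl_append, List.foldl_cons, List.foldl_nil, ih]
    calc min (List.foldl min a t) x = min x (List.foldl min a t) := Nat.min_comm _ _
    _ = List.foldl min (min x a) t := by rw [List.foldl_assoc]
    _ = List.foldl min (min a x) t := by rw [Nat.min_comm x a]

lemma wmin_eq_foldl (rows : List (List Char)) (w : Nat) :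
    wmin rows w = List.foldl min w (rows.map List.length) := by
  induction rows generalizing w with
  | nil => rfl
  | cons x t ih =>
    calc wmin (x :: t) w = wmin t (Nat.min w x.length) := rfl
    _ = List.foldl min (Nat.min w x.length) (t.map List.length) := ih _
    _ = _ := by simp

-- string-level folds are the char-level folds (zip/getD read only the characters)
lemma foldA_str (rowsS : List String) (i : Int) (init : List (Int × Int)) :
    (PySem.List.enumerate rowsS i).foldl
      (fun states p => (states.zip p.2.toList).map (fun q => updateState q.1 p.1 q.2)) init
    = (PySem.List.enumerate (rowsS.map String.toList) i).foldl
      (fun states p => (states.zip p.2).map (fun q => updateState q.1 p.1 q.2)) init := by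
  rw [enumerate_map, List.foldl_map]

lemma foldB_str (height : Int) (c : Nat) (rowsS : List String) (st0 : Int × Int) :
    (PySem.List.enumerate rowsS 0).foldl
      (fun (st : Int × Int) p =>
        if p.2.toList.getD c ' ' = 'O' then (st.1 + 1, st.2 + (height - st.1))
        else if p.2.toList.getD c ' ' = '#' then (p.1 + 1, st.2)
        else st) st0
    = (PySem.List.enumerate (rowsS.map String.toList) 0).foldl
      (fun (st : Int × Int) p =>
        if p.2.getD c ' ' = 'O' then (st.1 + 1, st.2 + (height - st.1))
        else if p.2.getD c ' ' = '#' then (p.1 + 1, st.2)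
        else st) st0 := by
  rw [enumerate_map, List.foldl_map]

-- ===== VERDICT (by name: the statement is the Claim_ definition above) =====
set_option maxHeartbeats 1600000 in
theorem part1_spec : Claim_equal_part1 := by
  intro input_ _hdom hpre
  obtain ⟨hne, hPre2⟩ := hpre
  unfold Spec_part1
  have hneS : input_.map (fun row => PySem.Str.strip row) ≠ [] := by simpa using hne
  have hmapS : (input_.map (fun row => PySem.Str.strip row)).map String.toList
      = input_.map (fun s => (PySem.Str.strip s).toList) := by
    rw [List.map_map]; rfl
  have hneL : input_.map (fun s => (PySem.Str.strip s).toList) ≠ [] := by simpa using hne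
  obtain ⟨l0, ltail, hL⟩ := List.exists_cons_of_ne_nil hneL
  -- B's width
  set W : Nat := List.foldl min l0.length (ltail.map List.length) with hWdef
  have hWle : ∀ x ∈ input_.map (fun s => (PySem.Str.strip s).toList), W ≤ x.length := by
    intro x hx
    rw [hL] at hx
    rcases List.mem_cons.mp hx with h1 | h'
    · rw [h1]; exact foldl_min_le_init _ _
    · exact foldl_min_le_mem _ _ (List.mem_map_of_mem h') _
  -- the bottom row, i.e. state[-1]
  set lastRow := (PySem.List.pyGet? (input_.map (fun row => PySem.Str.strip row)) (-1)).getD ""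
    with hlastDef
  have hlast : lastRow = (input_.map (fun row => PySem.Str.strip row)).getLast hneS := by
    rw [hlastDef, PySem.List.pyGet?_neg_one, List.getLast?_eq_some_getLast hneS, Option.getD_some]
  have hlastMem : lastRow.toList ∈ input_.map (fun s => (PySem.Str.strip s).toList) := by
    rw [hlast, ← hmapS]
    exact List.mem_map_of_mem (List.getLast_mem hneS)
  set C : Nat := lastRow.toList.length with hCdef
  have hWC : W ≤ C := hWle _ hlastMem
  -- A's surviving width equals B's width
  have hW' : wmin (input_.map (fun s => (PySem.Str.strip s).toList)).reverse C = W := by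
    rw [wmin_eq_foldl, List.map_reverse, foldl_min_reverse, hL]
    simp only [List.map_cons, List.foldl_cons]
    rw [List.foldl_assoc, ← hWdef]
    exact Nat.min_eq_right hWC
  -- columns below W consist of '.', 'O', '#' only (Pre_part1)
  have hgoodcol : ∀ c, c < W → ∀ ch ∈ colOf (input_.map (fun s => (PySem.Str.strip s).toList)) c,
      ch = '.' ∨ ch = 'O' ∨ ch = '#' := by
    intro c hc ch hch
    rcases List.mem_map.mp hch with ⟨row, hrow, rfl⟩
    have hlen : c < row.length := lt_of_lt_of_le hc (hWle row hrow)
    rw [List.getD_eq_getElem?_getD, List.getElem?_eq_getElem hlen, Option.getD_some]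
    by_contra hbad
    obtain ⟨r, hr, hEq⟩ := List.mem_iff_getElem.mp hrow
    have hgetD : (input_.map (fun s => (PySem.Str.strip s).toList)).getD r [] = row := by
      rw [List.getD_eq_getElem?_getD, List.getElem?_eq_getElem hr, Option.getD_some, hEq]
    have hconc := hPre2 r (List.mem_range.mpr hr) c (by rw [hgetD]; exact List.mem_range.mpr hlen)
      (by
        rw [hgetD, List.getD_eq_getElem?_getD, List.getElem?_eq_getElem hlen, Option.getD_some]
        simpa using hbad)
    rcases hconc with ⟨j, hj, _, hjlen⟩ | ⟨_, hlen'⟩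
    · have hjlt := List.mem_range.mp hj
      have hmem : (input_.map (fun s => (PySem.Str.strip s).toList)).getD j []
          ∈ input_.map (fun s => (PySem.Str.strip s).toList) := by
        rw [List.getD_eq_getElem?_getD, List.getElem?_eq_getElem hjlt, Option.getD_some]
        exact List.getElem_mem _
      exact absurd (lt_of_lt_of_le hc (hWle _ hmem)) (by omega)
    · have hrlt : r - 1 < (input_.map (fun s => (PySem.Str.strip s).toList)).length := by omega
      have hmem : (input_.map (fun s => (PySem.Str.strip s).toList)).getD (r - 1) []
          ∈ input_.map (fun s => (PySem.Str.strip s).toList) := by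
        rw [List.getD_eq_getElem?_getD, List.getElem?_eq_getElem hrlt, Option.getD_some]
        exact List.getElem_mem _
      exact absurd (lt_of_lt_of_le hc (hWle _ hmem)) (by omega)
  -- A's value
  have hA : part1 input_ = ((List.range W).map
      (fun c => (colA (colOf (input_.map (fun s => (PySem.Str.strip s).toList)) c)).1)).sum := by
    simp only [part1, ← hlastDef, ← hCdef]
    rw [foldA_str, List.map_reverse, hmapS]
    have hfin : (PySem.List.enumerate (input_.map (fun s => (PySem.Str.strip s).toList)).reverse 1).foldl
        (fun states p => (states.zip p.2).map (fun q => updateState q.1 p.1 q.2))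
        (List.replicate C ((0 : Int), (0 : Int)))
        = (List.range W).map (fun c => colA (colOf (input_.map (fun s => (PySem.Str.strip s).toList)) c)) := by
      apply List.ext_getElem?
      intro n
      by_cases hn : n < W
      · rw [stepA_get _ _ _ _ (by rw [List.length_replicate, hW']; exact hn)]
        rw [List.getElem?_map, List.getElem?_range hn, Option.map_some]
        have hrep : (List.replicate C ((0 : Int), (0 : Int))).getD n (0, 0) = (0, 0) := by
          simp [List.getD_eq_getElem?_getD, Nat.lt_of_lt_of_le hn hWC]
        rw [hrep, colStep_reverse]
      · rw [List.getElem?_eq_none (by rw [stepA_len, List.length_replicate, hW']; omega),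
          List.getElem?_eq_none (by simp; omega)]
    rw [hfin, List.map_map]
    rfl
  -- B's value
  have hAlt : part1_alt input_ = ((List.range W).map
      (fun c => bload (colOf (input_.map (fun s => (PySem.Str.strip s).toList)) c) 0)).sum := by
    simp only [part1_alt]
    have hw : (PySem.List.min? ((input_.map (fun row => PySem.Str.strip row)).map
        (fun r => r.toList.length)) (fun x => x)).getD 0 = W := by
      have h1 : (input_.map (fun row => PySem.Str.strip row)).map (fun r => r.toList.length)
          = (input_.map (fun s => (PySem.Str.strip s).toList)).map List.length := by
        simp only [List.map_map]
        rfl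
      rw [h1, hL, List.map_cons, PySem.List.min?_id_cons, Option.getD_some]
    rw [hw]
    have hfun : ∀ (t : Int) (c : Nat), c ∈ List.range W →
        ((PySem.List.enumerate (input_.map (fun row => PySem.Str.strip row)) 0).foldl
          (fun (st : Int × Int) p =>
            if p.2.toList.getD c ' ' = 'O'
              then (st.1 + 1, st.2 + (((input_.map (fun row => PySem.Str.strip row)).length : Int) - st.1))
            else if p.2.toList.getD c ' ' = '#' then (p.1 + 1, st.2)
            else st)
          ((0 : Int), t)).2
        = t + bload (colOf (input_.map (fun s => (PySem.Str.strip s).toList)) c) 0 := by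
      intro t c _
      rw [foldB_str, hmapS]
      have := innerB ((input_.map (fun row => PySem.Str.strip row)).length : Int) c
        (input_.map (fun s => (PySem.Str.strip s).toList)) 0 0 t (by simp)
      simpa using this
    calc (List.range W).foldl (fun total c =>
          ((PySem.List.enumerate (input_.map (fun row => PySem.Str.strip row)) 0).foldl
            (fun (st : Int × Int) p =>
              if p.2.toList.getD c ' ' = 'O'
                then (st.1 + 1, st.2 + (((input_.map (fun row => PySem.Str.strip row)).length : Int) - st.1))
              else if p.2.toList.getD c ' ' = '#' then (p.1 + 1, st.2)
              else st)
            ((0 : Int), total)).2) 0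
        = (List.range W).foldl (fun total c =>
            total + bload (colOf (input_.map (fun s => (PySem.Str.strip s).toList)) c) 0) 0 := by
          apply PySem.List.foldl_congr_mem'
          intro c hc t
          exact hfun t c hc
        _ = _ := by
          rw [PySem.List.foldl_add]
          exact zero_add _
  rw [hA, hAlt]
  apply congrArg
  apply List.map_congr_left
  intro c hc
  rw [colA_eq _ (hgoodcol c (List.mem_range.mp hc))]
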